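-- pv_equiv track=rewrite | github.com/Hakai-Shin/Wikipedia-Search-Engine | src/wiki_indexer.py | checkalnum
-- ===== SOURCE A (Python) =====
-- def checkalnum(s):
--     letter_flag = False
--     number_flag = False
--     for i in s:
--         if i.isalpha():
--             letter_flag = True
--         if i.isdigit():
--             number_flag = True
--     return letter_flag and number_flag
-- ===== SOURCE B (Python) =====
-- def checkalnum(s):
--     return any(c.isalpha() for c in s) and any(c.isdigit() for c in s)
-- ===== Notes on version B (the rewrite author's own statement) =====
-- stated objective: idiomatic
-- what changed: Replaces the single flag-updating loop with two independent short-circuiting any() scans combined by and.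
import Mathlib
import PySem

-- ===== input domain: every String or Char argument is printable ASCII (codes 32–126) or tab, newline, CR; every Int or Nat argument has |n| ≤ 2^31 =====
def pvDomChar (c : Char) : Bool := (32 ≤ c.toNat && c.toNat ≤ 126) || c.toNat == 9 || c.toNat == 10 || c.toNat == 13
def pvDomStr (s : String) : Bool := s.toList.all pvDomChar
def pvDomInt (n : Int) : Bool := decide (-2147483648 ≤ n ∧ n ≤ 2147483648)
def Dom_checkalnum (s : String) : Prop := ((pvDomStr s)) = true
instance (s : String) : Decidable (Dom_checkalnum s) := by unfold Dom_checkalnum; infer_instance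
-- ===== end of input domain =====

-- B replaces A's one combined flag-updating loop by two independent short-circuiting scans (idiomatic; same cost).

-- ===== PORT A =====
-- one pass carrying (letter_flag, number_flag)
def checkalnum (s : String) : Bool :=
  let fl := s.toList.foldl
    (fun (st : Bool × Bool) i =>
      let st1 := if PySem.Chars.isalpha i then (true, st.2) else st
      if PySem.Chars.isdigit i then (st1.1, true) else st1)
    (false, false)
  fl.1 && fl.2

-- ===== PORT B =====
-- two separate short-circuiting scans
def checkalnum_alt (s : String) : Bool :=
  s.toList.any (fun c => PySem.Chars.isalpha c) && s.toList.any (fun c => PySem.Chars.isdigit c)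

-- ===== PRECONDITION & SPEC =====
def Spec_checkalnum (s : String) (out : Bool) : Prop := out = checkalnum_alt s
instance (s : String) (out : Bool) : Decidable (Spec_checkalnum s out) := by unfold Spec_checkalnum; infer_instance

-- ===== CLAIM (what is proved, stated in full; the proofs are below) =====
def Claim_equal_checkalnum : Prop := ∀ (s : String), Dom_checkalnum s → Spec_checkalnum s (checkalnum s)

-- ===== LEMMAS AND PROOFS =====
theorem checkalnum_loop_eq (l : List Char) (a b : Bool) :
    l.foldl
      (fun (st : Bool × Bool) i =>
        let st1 := if PySem.Chars.isalpha i then (true, st.2) else st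
        if PySem.Chars.isdigit i then (st1.1, true) else st1)
      (a, b)
    = (a || l.any (fun c => PySem.Chars.isalpha c), b || l.any (fun c => PySem.Chars.isdigit c)) := by
  induction l generalizing a b with
  | nil => simp
  | cons c t ih =>
    simp only [List.foldl_cons, List.any_cons]
    by_cases h1 : PySem.Chars.isalpha c <;> by_cases h2 : PySem.Chars.isdigit c <;>
      simp [h1, h2, ih]

-- ===== VERDICT (by name: the statement is the Claim_ definition above) =====
theorem checkalnum_spec : Claim_equal_checkalnum := by
  intro s _
  unfold Spec_checkalnum checkalnum checkalnum_alt
  simp [checkalnum_loop_eq]
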